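-- pv_equiv track=rewrite | github.com/essete02-source/Tp_1_Indexation_Web | tp_3.code.py | check_all_tokens
-- ===== SOURCE A (Python) =====
-- def check_all_tokens(query_tokens, champ_index):
--     """ champ = title or description"""
--     listes_url =[]
--     for token in query_tokens:
--         if token in champ_index:
--             listes_url.append(set(champ_index[token].keys()))
--         else:
--             return set() # si au moins un token n'est pas trouvé
--     if listes_url:
--         return set.intersection(*listes_url) # on conserve les urls qui contiennenr tous les tokens
--     else:
--         return set()
-- ===== SOURCE B (Python) =====
-- def check_all_tokens(query_tokens, champ_index):
--     """Counting pass: tally, per URL, how many query tokens index it; keep URLs hit by all."""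
--     counts = {}
--     for token in query_tokens:
--         if token not in champ_index:
--             return set()  # at least one token not found
--         for url in champ_index[token].keys():
--             counts[url] = counts.get(url, 0) + 1
--     n = len(query_tokens)
--     return {url for url, c in counts.items() if c == n}
-- ===== Notes on version B (the rewrite author's own statement) =====
-- stated objective: alternative
-- what changed: Replaces building a list of key-sets and folding set.intersection over it with a single counting pass (a dict tallying per-URL occurrences) followed by a threshold filter c == len(query_tokens).
import Mathlib
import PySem

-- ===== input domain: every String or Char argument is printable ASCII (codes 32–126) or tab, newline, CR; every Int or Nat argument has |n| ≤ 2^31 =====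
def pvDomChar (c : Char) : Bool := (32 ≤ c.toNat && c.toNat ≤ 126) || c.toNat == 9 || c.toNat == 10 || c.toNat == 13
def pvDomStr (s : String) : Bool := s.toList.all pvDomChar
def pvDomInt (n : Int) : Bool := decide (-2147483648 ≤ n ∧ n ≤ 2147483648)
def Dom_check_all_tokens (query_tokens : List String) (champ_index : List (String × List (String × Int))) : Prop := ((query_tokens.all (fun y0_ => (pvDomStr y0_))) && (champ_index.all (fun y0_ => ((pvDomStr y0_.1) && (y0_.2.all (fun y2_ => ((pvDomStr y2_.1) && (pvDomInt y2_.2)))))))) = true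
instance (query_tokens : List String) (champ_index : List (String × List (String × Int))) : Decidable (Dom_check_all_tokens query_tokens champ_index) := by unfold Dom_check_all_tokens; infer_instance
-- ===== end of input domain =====

-- B replaces the fold of set intersections with one counting pass plus a threshold filter (alternative decomposition, same cost).

-- ===== PORT A =====
-- the 'for token in query_tokens' loop: collects set(champ_index[token].keys()) per token, none = the early 'return set()'
def pvGatherA (ci : PySem.Dict String (List (String × Int))) : List String → Option (List (List String))
  | [] => some []
  | t :: ts =>
    match ci.get? t with
    | some inner => (pvGatherA ci ts).map (fun r => (PySem.Dict.ofList inner).keys :: r)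
    | none => none

def check_all_tokens (query_tokens : List String) (champ_index : List (String × List (String × Int))) : List String :=
  match pvGatherA (PySem.Dict.ofList champ_index) query_tokens with
  | none => []
  | some [] => []
  | some (s :: rest) => rest.foldl PySem.Set.inter s

-- ===== PORT B =====
-- the counting loop of Source B: counts[url] = counts.get(url, 0) + 1 over each found token's keys; none = early 'return set()'
def pvCountB (ci : PySem.Dict String (List (String × Int))) (d : PySem.Dict String Int) : List String → Option (PySem.Dict String Int)
  | [] => some d
  | t :: ts =>
    match ci.get? t with
    | some inner =>
        pvCountB ci ((PySem.Dict.ofList inner).keys.foldl (fun d u => d.modify u 0 (· + 1)) d) ts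
    | none => none

def check_all_tokens_alt (query_tokens : List String) (champ_index : List (String × List (String × Int))) : List String :=
  match pvCountB (PySem.Dict.ofList champ_index) PySem.Dict.empty query_tokens with
  | none => []
  | some counts =>
      ((counts.items.filter (fun p => p.2 == (query_tokens.length : Int))).map (·.1))

-- ===== PRECONDITION & SPEC =====
def Spec_check_all_tokens (query_tokens : List String) (champ_index : List (String × List (String × Int))) (out : List String) : Prop := out = check_all_tokens_alt query_tokens champ_index
instance (query_tokens : List String) (champ_index : List (String × List (String × Int))) (out : List String) : Decidable (Spec_check_all_tokens query_tokens champ_index out) := by unfold Spec_check_all_tokens; infer_instance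

-- ===== CLAIM (what is proved, stated in full; the proofs are below) =====
def Claim_equal_check_all_tokens : Prop := ∀ (query_tokens : List String) (champ_index : List (String × List (String × Int))), Dom_check_all_tokens query_tokens champ_index → Spec_check_all_tokens query_tokens champ_index (check_all_tokens query_tokens champ_index)

-- ===== LEMMAS AND PROOFS =====

-- B's loop = counter of the concatenation of A's gathered key lists
lemma pvCountB_eq (ci : PySem.Dict String (List (String × Int))) (qs : List String)
    (d : PySem.Dict String Int) :
    pvCountB ci d qs = (pvGatherA ci qs).map
      (fun ss => ss.flatten.foldl (fun d u => d.modify u 0 (· + 1)) d) := by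
  induction qs generalizing d with
  | nil => simp [pvCountB, pvGatherA]
  | cons t ts ih =>
    simp only [pvCountB, pvGatherA]
    cases ci.get? t with
    | none => simp
    | some inner =>
      simp only [ih]
      cases pvGatherA ci ts with
      | none => simp
      | some r => simp [List.foldl_append]

lemma pvGatherA_length (ci : PySem.Dict String (List (String × Int))) (qs : List String)
    (ss : List (List String)) (h : pvGatherA ci qs = some ss) : ss.length = qs.length := by
  induction qs generalizing ss with
  | nil =>
    injection h with h
    simp [← h]
  | cons t ts ih =>
    simp only [pvGatherA] at h
    cases hg : ci.get? t with
    | none => simp [hg] at h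
    | some inner =>
      rw [hg] at h
      cases hrec : pvGatherA ci ts with
      | none => simp [hrec] at h
      | some r =>
        simp [hrec] at h
        simp [← h, ih r hrec]

lemma pvGatherA_nodup (ci : PySem.Dict String (List (String × Int))) (qs : List String)
    (ss : List (List String)) (h : pvGatherA ci qs = some ss) : ∀ s ∈ ss, s.Nodup := by
  induction qs generalizing ss with
  | nil =>
    injection h with h
    intro s hs; rw [← h] at hs; simp at hs
  | cons t ts ih =>
    simp only [pvGatherA] at h
    cases hg : ci.get? t with
    | none => simp [hg] at h
    | some inner =>
      rw [hg] at h
      cases hrec : pvGatherA ci ts with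
      | none => simp [hrec] at h
      | some r =>
        simp [hrec] at h
        intro s hs
        rw [← h] at hs
        rcases List.mem_cons.mp hs with rfl | hs
        · exact PySem.Dict.nodup_keys_ofList inner
        · exact ih r hrec s hs

-- A's fold of intersections, as a filter of the first set
lemma foldl_inter_eq_filter (rest : List (List String)) (s : List String) (hs : s.Nodup) :
    rest.foldl PySem.Set.inter s = s.filter (fun u => rest.all (fun t => decide (u ∈ t))) := by
  induction rest generalizing s with
  | nil => simp
  | cons t rest ih =>
    have h1 : PySem.Set.inter s t = s.filter (fun u => decide (u ∈ t)) := by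
      simp [PySem.Set.inter]
    rw [List.foldl_cons, ih _ (PySem.Set.nodup_inter s t hs), h1, List.filter_filter]
    apply List.filter_congr
    intro u _
    simp [Bool.and_comm]

-- counting over nodup lists: the total count reaches the number of lists iff u lies in every list
lemma count_flatten_le (rest : List (List String)) (u : String)
    (hn : ∀ t ∈ rest, t.Nodup) : rest.flatten.count u ≤ rest.length := by
  induction rest with
  | nil => simp
  | cons t rest ih =>
    simp only [List.flatten_cons, List.count_append, List.length_cons]
    have h1 : t.count u ≤ 1 := List.nodup_iff_count_le_one.mp (hn t (by simp)) u
    have h2 := ih (fun t ht => hn t (by simp [ht]))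
    omega

lemma count_flatten_eq_iff (rest : List (List String)) (u : String)
    (hn : ∀ t ∈ rest, t.Nodup) :
    rest.flatten.count u = rest.length ↔ ∀ t ∈ rest, u ∈ t := by
  induction rest with
  | nil => simp
  | cons t rest ih =>
    simp only [List.flatten_cons, List.count_append, List.length_cons]
    have h1 : t.count u ≤ 1 := List.nodup_iff_count_le_one.mp (hn t (by simp)) u
    have h2 := count_flatten_le rest u (fun t ht => hn t (by simp [ht]))
    have h3 := ih (fun t ht => hn t (by simp [ht]))
    constructor
    · intro h
      have hc1 : t.count u = 1 := by omega
      have hcr : rest.flatten.count u = rest.length := by omega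
      intro t' ht'
      rcases List.mem_cons.mp ht' with rfl | ht'
      · exact List.count_pos_iff.mp (by omega)
      · exact (h3.mp hcr) t' ht'
    · intro h
      have hmt : u ∈ t := h t (by simp)
      have hc1 : 1 ≤ t.count u := List.count_pos_iff.mpr hmt
      have hcr : rest.flatten.count u = rest.length :=
        h3.mpr (fun t' ht' => h t' (by simp [ht']))
      omega

-- the key agreement, on the gathered key lists
lemma counts_filter_eq (s : List String) (rest : List (List String)) (hs : s.Nodup)
    (hrest : ∀ t ∈ rest, t.Nodup) :
    ((PySem.Set.ofList ((s :: rest).flatten)).filter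
        (fun u => decide ((((s :: rest).flatten).count u : Int) = ((rest.length : Int) + 1)))) =
      rest.foldl PySem.Set.inter s := by
  rw [foldl_inter_eq_filter rest s hs]
  have hofl : PySem.Set.ofList ((s :: rest).flatten)
      = s ++ (PySem.Set.ofList rest.flatten).filter (fun y => !(PySem.Set.contains s y)) := by
    rw [List.flatten_cons, PySem.Set.ofList_append, PySem.Set.update_eq_append_filter]
    simp only [PySem.Set.ofList_eq_self_of_nodup s hs]
  rw [hofl, List.filter_append]
  have hF := count_flatten_le rest
  have hiff := count_flatten_eq_iff rest
  have hext : ((PySem.Set.ofList rest.flatten).filter (fun y => !(PySem.Set.contains s y))).filter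
      (fun u => decide ((((s :: rest).flatten).count u : Int) = ((rest.length : Int) + 1))) = [] := by
    rw [List.filter_eq_nil_iff]
    intro u hu
    have hus : u ∉ s := by
      have := (List.mem_filter.mp hu).2
      simpa [PySem.Set.contains_iff] using this
    have hcs : s.count u = 0 := List.count_eq_zero.mpr hus
    have hle := hF u hrest
    simp only [List.flatten_cons, List.count_append, hcs, Nat.zero_add, decide_eq_true_eq]
    intro hcontra
    omega
  rw [hext, List.append_nil]
  apply List.filter_congr
  intro u hu
  have hcs : s.count u = 1 := List.count_eq_one_of_mem hs hu
  have hle := hF u hrest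
  have hif := hiff u hrest
  simp only [List.flatten_cons, List.count_append, hcs]
  rw [Bool.eq_iff_iff]
  simp only [decide_eq_true_eq, List.all_eq_true, decide_eq_true_eq]
  constructor
  · intro h
    apply hif.mp
    push_cast at h
    omega
  · intro h
    have := hif.mpr h
    push_cast
    omega

-- ===== VERDICT (by name: the statement is the Claim_ definition above) =====
theorem check_all_tokens_spec : Claim_equal_check_all_tokens := by
  intro qs ci _
  unfold Spec_check_all_tokens check_all_tokens check_all_tokens_alt
  rw [pvCountB_eq]
  cases hg : pvGatherA (PySem.Dict.ofList ci) qs with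
  | none => simp
  | some ss =>
    simp only [Option.map_some]
    cases ss with
    | nil =>
      have : qs.length = 0 := by simpa using (pvGatherA_length _ _ _ hg).symm
      simp [List.length_eq_zero_iff.mp this, PySem.Dict.empty]
    | cons s rest =>
      have hn := pvGatherA_nodup _ _ _ hg
      have hs : s.Nodup := hn s (by simp)
      have hrest : ∀ t ∈ rest, t.Nodup := fun t ht => hn t (by simp [ht])
      have hlen : rest.length + 1 = qs.length := by
        simpa using pvGatherA_length _ _ _ hg
      have hcnt : (s :: rest).flatten.foldl (fun d u => d.modify u 0 (· + 1)) PySem.Dict.empty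
          = PySem.Dict.counter ((s :: rest).flatten) := (PySem.Dict.counter_eq_foldl _).symm
      rw [hcnt]
      show rest.foldl PySem.Set.inter s = _
      rw [← counts_filter_eq s rest hs hrest]
      rw [PySem.Dict.items_counter]
      rw [List.filter_map, List.map_map]
      have hmap : ((fun x => x.1) ∘ fun k => (k, ((s :: rest).flatten.count k : Int))) = id := rfl
      rw [hmap, List.map_id]
      apply List.filter_congr
      intro u _
      rw [Bool.eq_iff_iff, ← hlen]
      constructor
      · intro h
        rw [decide_eq_true_eq] at h
        rw [Function.comp_apply, beq_iff_eq]
        push_cast at h ⊢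
        omega
      · intro h
        rw [Function.comp_apply, beq_iff_eq] at h
        rw [decide_eq_true_eq]
        push_cast at h ⊢
        omega
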